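-- pv_equiv track=rewrite | github.com/pypi-data/pypi-mirror-403 | packages/caspian-utils/caspian_utils-0.0.32.tar.gz/caspian_utils-0.0.32/casp/validate.py | _php_to_py_format
-- ===== SOURCE A (Python) =====
-- def _php_to_py_format(fmt: str) -> str:
--     """
--     Minimal PHP date format -> Python strptime/strftime mapping.
--     """
--     mapping: dict[str, str] = {
--         "Y": "%Y",
--         "m": "%m",
--         "d": "%d",
--         "H": "%H",
--         "i": "%M",
--         "s": "%S",
--         "u": "%f",
--     }
--
--     out: list[str] = []
--     i = 0
--     while i < len(fmt):
--         ch = fmt[i]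
--         out.append(mapping.get(ch, ch))
--         i += 1
--     return "".join(out)
-- ===== SOURCE B (Python) =====
-- def _php_to_py_format(fmt: str) -> str:
--     """PHP date format -> Python format: one chained whole-string replace per
--     token (safe: no mapping key occurs in a value substituted earlier)."""
--     return (fmt.replace("Y", "%Y")
--                .replace("m", "%m")
--                .replace("d", "%d")
--                .replace("H", "%H")
--                .replace("i", "%M")
--                .replace("s", "%S")
--                .replace("u", "%f"))
-- ===== Notes on version B (the rewrite author's own statement) =====
-- stated objective: simpler
-- what changed: Instead of scanning the string character by character with an index loop, an output list and a dict lookup per char, B is a single chained expression of seven whole-string str.replace passes, one per mapping token (safe: no mapping key occurs in a value substituted earlier, so passes cannot cascade); the passes run in C, removing the Python-level per-char loop.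
import Mathlib
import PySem

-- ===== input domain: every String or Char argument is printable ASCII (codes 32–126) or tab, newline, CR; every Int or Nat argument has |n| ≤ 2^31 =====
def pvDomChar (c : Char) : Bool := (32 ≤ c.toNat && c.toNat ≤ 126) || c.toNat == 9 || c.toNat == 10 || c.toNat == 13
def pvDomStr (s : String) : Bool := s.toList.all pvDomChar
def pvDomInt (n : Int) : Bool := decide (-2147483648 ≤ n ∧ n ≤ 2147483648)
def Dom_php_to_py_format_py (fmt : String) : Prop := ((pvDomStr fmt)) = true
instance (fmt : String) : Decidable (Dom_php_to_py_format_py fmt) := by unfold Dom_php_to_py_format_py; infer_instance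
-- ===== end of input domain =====

-- B replaces A's indexed char-by-char scan (list accumulator + dict lookup + join)
-- with a single chained expression of seven whole-string replace passes (simpler/idiomatic; no cascading possible).


-- ===== PORT A =====
-- the dict literal of A
def phpMapping : PySem.Dict String String :=
  PySem.Dict.ofList [("Y", "%Y"), ("m", "%m"), ("d", "%d"), ("H", "%H"),
                     ("i", "%M"), ("s", "%S"), ("u", "%f")]

-- while-loop over i in [0, len(fmt)): out.append(mapping.get(fmt[i], fmt[i])); "".join(out)
def php_to_py_format_py (fmt : String) : String :=
  let out : List String :=
    (PySem.List.pyRange 0 (PySem.Str.len fmt) 1).foldl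
      (fun out i =>
        let ch : String := String.ofList [PySem.List.pyGetD fmt.toList i ' ']  -- i is always in range
        out ++ [phpMapping.getD ch ch]) []
  PySem.Str.join "" out

-- ===== PORT B =====
-- one chained replace pass per mapping token
def php_to_py_format_py_alt (fmt : String) : String :=
  PySem.Str.replace (PySem.Str.replace (PySem.Str.replace (PySem.Str.replace
    (PySem.Str.replace (PySem.Str.replace (PySem.Str.replace fmt
      "Y" "%Y") "m" "%m") "d" "%d") "H" "%H") "i" "%M") "s" "%S") "u" "%f"

-- ===== PRECONDITION & SPEC =====
def Spec_php_to_py_format_py (fmt : String) (out : String) : Prop := out = php_to_py_format_py_alt fmt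
instance (fmt : String) (out : String) : Decidable (Spec_php_to_py_format_py fmt out) := by unfold Spec_php_to_py_format_py; infer_instance

-- ===== CLAIM (what is proved, stated in full; the proofs are below) =====
def Claim_equal_php_to_py_format_py : Prop := ∀ (fmt : String), Dom_php_to_py_format_py fmt → Spec_php_to_py_format_py fmt (php_to_py_format_py fmt)

-- ===== LEMMAS AND PROOFS =====

-- substitution of a single-char pattern, as a per-character function
def sub1 (k : Char) (v : List Char) (c : Char) : List Char := if c = k then v else [c]

-- A's per-character mapping, written out
def gAc (c : Char) : List Char :=
  if c = 'Y' then ['%', 'Y'] else if c = 'm' then ['%', 'm'] else if c = 'd' then ['%', 'd']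
  else if c = 'H' then ['%', 'H'] else if c = 'i' then ['%', 'M'] else if c = 's' then ['%', 'S']
  else if c = 'u' then ['%', 'f'] else [c]

lemma go_single (k : Char) (v : List Char) :
    ∀ (l : List Char) (fuel : Nat) (acc : List Char), l.length ≤ fuel →
      PySem.Chars.replace.go [k] v fuel l acc = acc.reverse ++ l.flatMap (sub1 k v) := by
  intro l
  induction l with
  | nil =>
      intro fuel acc _
      cases fuel <;> simp [PySem.Chars.replace.go]
  | cons c t ih =>
      intro fuel acc hle
      cases fuel with
      | zero => simp at hle
      | succ n =>
        by_cases hc : c = k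
        · subst hc
          have hpre : List.isPrefixOf [c] (c :: t) = true := by simp [List.isPrefixOf]
          rw [PySem.Chars.replace.go, if_pos hpre]
          simp only [List.length_cons, List.length_nil, List.drop_succ_cons, List.drop_zero]
          simp only [List.length_cons] at hle
          rw [ih n (v.reverse ++ acc) (by omega)]
          simp [sub1]
        · have hpre : List.isPrefixOf [k] (c :: t) = false := by
            simp [List.isPrefixOf]; exact fun h => absurd h.symm hc
          rw [PySem.Chars.replace.go, if_neg (by simp [hpre])]
          simp only [List.length_cons] at hle
          rw [ih n (c :: acc) (by omega)]
          simp [sub1, hc]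

lemma replace_single (l : List Char) (k : Char) (v : List Char) :
    PySem.Chars.replace l [k] v = l.flatMap (sub1 k v) := by
  rw [PySem.Chars.replace, if_neg (by simp)]
  simpa using go_single k v l l.length [] le_rfl

lemma chain_eq (l : List Char) :
    ((((((l.flatMap (sub1 'Y' ['%','Y'])).flatMap (sub1 'm' ['%','m'])).flatMap
        (sub1 'd' ['%','d'])).flatMap (sub1 'H' ['%','H'])).flatMap
        (sub1 'i' ['%','M'])).flatMap (sub1 's' ['%','S'])).flatMap (sub1 'u' ['%','f'])
      = l.flatMap gAc := by
  simp only [List.flatMap_assoc]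
  apply List.flatMap_congr
  intro c _
  by_cases h1 : c = 'Y'; · subst h1; decide
  by_cases h2 : c = 'm'; · subst h2; decide
  by_cases h3 : c = 'd'; · subst h3; decide
  by_cases h4 : c = 'H'; · subst h4; decide
  by_cases h5 : c = 'i'; · subst h5; decide
  by_cases h6 : c = 's'; · subst h6; decide
  by_cases h7 : c = 'u'; · subst h7; decide
  simp [sub1, gAc, h1, h2, h3, h4, h5, h6, h7]

lemma alt_toList (fmt : String) :
    (php_to_py_format_py_alt fmt).toList = fmt.toList.flatMap gAc := by
  simp only [php_to_py_format_py_alt]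
  simp only [PySem.Str.replace, String.toList_ofList,
    show ("Y" : String).toList = ['Y'] from rfl, show ("%Y" : String).toList = ['%','Y'] from rfl,
    show ("m" : String).toList = ['m'] from rfl, show ("%m" : String).toList = ['%','m'] from rfl,
    show ("d" : String).toList = ['d'] from rfl, show ("%d" : String).toList = ['%','d'] from rfl,
    show ("H" : String).toList = ['H'] from rfl, show ("%H" : String).toList = ['%','H'] from rfl,
    show ("i" : String).toList = ['i'] from rfl, show ("%M" : String).toList = ['%','M'] from rfl,
    show ("s" : String).toList = ['s'] from rfl, show ("%S" : String).toList = ['%','S'] from rfl,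
    show ("u" : String).toList = ['u'] from rfl, show ("%f" : String).toList = ['%','f'] from rfl]
  simp only [replace_single]
  exact chain_eq fmt.toList

lemma phpMapping_mk : phpMapping = PySem.Dict.mk
    [("Y", "%Y"), ("m", "%m"), ("d", "%d"), ("H", "%H"), ("i", "%M"), ("s", "%S"), ("u", "%f")] := by
  decide

lemma getD_char (c : Char) :
    phpMapping.getD (String.ofList [c]) (String.ofList [c]) = String.ofList (gAc c) := by
  by_cases h1 : c = 'Y'; · subst h1; decide
  by_cases h2 : c = 'm'; · subst h2; decide
  by_cases h3 : c = 'd'; · subst h3; decide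
  by_cases h4 : c = 'H'; · subst h4; decide
  by_cases h5 : c = 'i'; · subst h5; decide
  by_cases h6 : c = 's'; · subst h6; decide
  by_cases h7 : c = 'u'; · subst h7; decide
  have hk : ∀ (k : Char), c ≠ k → (String.ofList [k] == String.ofList [c]) = false := by
    intro k hne
    simp [beq_eq_false_iff_ne, ← String.toList_inj]
    exact fun h => hne (h.symm)
  rw [phpMapping_mk]
  simp only [show ("Y" : String) = String.ofList ['Y'] from rfl,
    show ("m" : String) = String.ofList ['m'] from rfl,
    show ("d" : String) = String.ofList ['d'] from rfl,
    show ("H" : String) = String.ofList ['H'] from rfl,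
    show ("i" : String) = String.ofList ['i'] from rfl,
    show ("s" : String) = String.ofList ['s'] from rfl,
    show ("u" : String) = String.ofList ['u'] from rfl]
  simp [PySem.Dict.getD, PySem.Dict.get?,
    hk _ h1, hk _ h2, hk _ h3, hk _ h4, hk _ h5, hk _ h6, hk _ h7,
    gAc, h1, h2, h3, h4, h5, h6, h7]

lemma join_nil_flatten : ∀ (xss : List (List Char)), PySem.Chars.join [] xss = xss.flatten := by
  intro xss
  induction xss with
  | nil => simp [PySem.Chars.join_nil]
  | cons x t ih =>
      cases t with
      | nil => simp [PySem.Chars.join_singleton]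
      | cons y u => rw [PySem.Chars.join_cons_cons, ih]; simp

lemma flatten_map_singleton {α β : Type} (l : List α) (f : α → List β) :
    (List.map (fun ch => [f ch]) l).flatten = List.map f l := by
  induction l with
  | nil => simp
  | cons c t ih => simp [ih]

lemma a_toList (fmt : String) :
    (php_to_py_format_py fmt).toList = fmt.toList.flatMap gAc := by
  unfold php_to_py_format_py
  have hlen : PySem.Str.len fmt = (fmt.toList.length : Int) := by
    simp [PySem.Str.len]
  rw [hlen,
    PySem.List.foldl_pyRange_zero_pyGetD' fmt.toList ' '
      (fun (out : List String) (ch : Char) =>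
        out ++ [phpMapping.getD (String.ofList [ch]) (String.ofList [ch])]) []]
  rw [PySem.List.foldl_append_eq_flatMap
      (fun ch => [phpMapping.getD (String.ofList [ch]) (String.ofList [ch])]) fmt.toList []]
  rw [PySem.Str.toList_join]
  rw [show ("" : String).toList = ([] : List Char) from rfl, join_nil_flatten]
  simp only [List.nil_append, List.flatMap, List.map_flatten]
  congr 1
  simp only [List.map_map, Function.comp_def, getD_char, String.toList_ofList,
    List.map_cons, List.map_nil]
  exact flatten_map_singleton fmt.toList gAc

-- ===== VERDICT (by name: the statement is the Claim_ definition above) =====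
theorem php_to_py_format_py_spec : Claim_equal_php_to_py_format_py := by
  intro fmt _
  unfold Spec_php_to_py_format_py
  rw [← String.toList_inj, a_toList, alt_toList]
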